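-- pv_equiv track=rewrite | github.com/mudigitalemployee-tech/claw-skill | csv-data-quality-profiler/scripts/csv_dq_report.py | _header_issues
-- ===== SOURCE A (Python) =====
-- from typing import Dict, List, Optional, Tuple
--
-- def _header_issues(columns: List[str]) -> Dict[str, object]:
--     raw = list(columns)
--     normalized = [c.strip() for c in raw]
--     dup_raw = sorted({c for c in raw if raw.count(c) > 1})
--     dup_norm = sorted({c for c in normalized if normalized.count(c) > 1})
--     whitespace = [c for c in raw if c != c.strip()]
--     empty_names = [c for c in raw if c.strip() == ""]
--
--     return {
--         "duplicate_column_names": dup_raw,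
--         "duplicate_column_names_after_strip": dup_norm,
--         "columns_with_leading_trailing_whitespace": whitespace,
--         "empty_column_names": empty_names,
--     }
-- ===== SOURCE B (Python) =====
-- def _header_issues(columns):
--     def run_dups(ys):
--         # ys is sorted: equal values are adjacent; emit one copy per run longer than 1
--         out = []
--         i = 0
--         n = len(ys)
--         while i < n:
--             j = i + 1
--             while j < n and ys[j] == ys[i]:
--                 j += 1
--             if j - i > 1:
--                 out.append(ys[i])
--             i = j
--         return out
--
--     stripped = [c.strip() for c in columns]
--     return {
--         "duplicate_column_names": run_dups(sorted(columns)),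
--         "duplicate_column_names_after_strip": run_dups(sorted(stripped)),
--         "columns_with_leading_trailing_whitespace": [c for c, s in zip(columns, stripped) if c != s],
--         "empty_column_names": [c for c, s in zip(columns, stripped) if s == ""],
--     }
-- ===== Notes on version B (the rewrite author's own statement) =====
-- stated objective: faster
-- what changed: B finds duplicates by sort-then-adjacent-run-scan (sort once, walk runs of equal neighbours) instead of A's per-element whole-list .count re-scans inside set comprehensions, and derives the whitespace/empty lists from one precomputed stripped list zipped with the input.
import Mathlib
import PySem

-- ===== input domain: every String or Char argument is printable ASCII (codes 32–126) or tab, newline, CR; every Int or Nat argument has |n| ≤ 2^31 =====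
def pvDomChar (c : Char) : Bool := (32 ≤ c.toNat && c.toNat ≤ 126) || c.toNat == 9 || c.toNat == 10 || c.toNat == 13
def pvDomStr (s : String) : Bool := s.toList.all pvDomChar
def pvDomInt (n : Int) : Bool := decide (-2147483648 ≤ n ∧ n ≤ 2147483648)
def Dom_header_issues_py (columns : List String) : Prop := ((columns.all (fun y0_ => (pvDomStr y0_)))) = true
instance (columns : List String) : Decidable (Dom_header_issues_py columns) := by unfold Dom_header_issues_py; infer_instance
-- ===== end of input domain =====

-- B finds duplicates by sort-then-adjacent-run-scan and fuses the whitespace/empty filters over one precomputed stripped list, replacing A's per-element whole-list .count re-scans (objective: faster).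


-- ===== PORT A =====
def header_issues_py (columns : List String) : List (String × List String) :=
  let raw := columns
  let normalized := raw.map PySem.Str.strip
  let dup_raw := PySem.List.sorted (PySem.Set.ofList (raw.filter (fun c => 1 < raw.count c))) (fun x => x) false
  let dup_norm := PySem.List.sorted (PySem.Set.ofList (normalized.filter (fun c => 1 < normalized.count c))) (fun x => x) false
  let whitespace := raw.filter (fun c => c ≠ PySem.Str.strip c)
  let empty_names := raw.filter (fun c => PySem.Str.strip c == "")
  [("duplicate_column_names", dup_raw),
   ("duplicate_column_names_after_strip", dup_norm),
   ("columns_with_leading_trailing_whitespace", whitespace),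
   ("empty_column_names", empty_names)]

-- ===== PORT B =====
-- B's run_dups: walk the sorted list run by run (the inner while = dropWhile of the
-- current value), emit the value once when its run is longer than 1
def runDups : List String → List String
  | [] => []
  | a :: rest =>
    let t := rest.dropWhile (· == a)
    if t.length < rest.length then a :: runDups t else runDups t
termination_by ys => ys.length
decreasing_by all_goals exact Nat.lt_succ_of_le (List.length_dropWhile_le _ _)

def header_issues_py_alt (columns : List String) : List (String × List String) :=
  let stripped := columns.map PySem.Str.strip
  [("duplicate_column_names", runDups (PySem.List.sorted columns (fun x => x) false)),
   ("duplicate_column_names_after_strip", runDups (PySem.List.sorted stripped (fun x => x) false)),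
   ("columns_with_leading_trailing_whitespace", ((columns.zip stripped).filter (fun p => p.1 ≠ p.2)).map Prod.fst),
   ("empty_column_names", ((columns.zip stripped).filter (fun p => p.2 == "")).map Prod.fst)]

-- ===== PRECONDITION & SPEC =====
def Spec_header_issues_py (columns : List String) (out : List (String × List String)) : Prop := out = header_issues_py_alt columns
instance (columns : List String) (out : List (String × List String)) : Decidable (Spec_header_issues_py columns out) := by unfold Spec_header_issues_py; infer_instance

-- ===== CLAIM (what is proved, stated in full; the proofs are below) =====
def Claim_equal_header_issues_py : Prop := ∀ (columns : List String), Dom_header_issues_py columns → Spec_header_issues_py columns (header_issues_py columns)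

-- ===== LEMMAS AND PROOFS =====

-- on a ≤-sorted list, runDups is strictly increasing and contains exactly the values of count > 1
theorem runDups_spec (ys : List String) (h : ys.Pairwise (· ≤ ·)) :
    (runDups ys).Pairwise (· < ·) ∧ ∀ x, x ∈ runDups ys ↔ 1 < ys.count x := by
  induction ys using runDups.induct with
  | case1 => simp [runDups]
  | case2 a rest t ht ih =>
    have hsub : t.Sublist rest := by
      simpa [t] using List.dropWhile_sublist (l := rest) (p := (· == a))
    have hpt : t.Pairwise (· ≤ ·) := ((List.pairwise_cons.mp h).2).sublist hsub
    have hale : ∀ x ∈ rest, a ≤ x := (List.pairwise_cons.mp h).1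
    have hgt : ∀ x ∈ t, a < x := by
      cases hh : t with
      | nil => simp
      | cons b t' =>
        have hba : ¬ (b == a) = true := by
          have := List.head?_dropWhile_not (p := (· == a)) (l := rest)
          rw [show rest.dropWhile (· == a) = t from rfl, hh] at this
          simpa using this
        have hab : a ≤ b := hale b (hsub.mem (by simp [hh]))
        have hne : a ≠ b := fun he => hba (by simp [he])
        have halt : a < b := lt_of_le_of_ne hab hne
        intro x hx
        rcases (by simpa [hh] using hx : x = b ∨ x ∈ t') with rfl | hx'
        · exact halt
        · have hblex : b ≤ x := ((List.pairwise_cons.mp (hh ▸ hpt)).1) x hx'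
          exact lt_of_lt_of_le halt hblex
    have hanot : a ∉ t := fun hx => lt_irrefl a (hgt a hx)
    obtain ⟨w, hwdef, hwall⟩ : ∃ w, w ++ t = rest ∧ ∀ x ∈ w, x = a :=
      ⟨rest.takeWhile (· == a), List.takeWhile_append_dropWhile,
       fun x hx => by simpa using List.mem_takeWhile_imp hx⟩
    have hcount : ∀ x, (a :: rest).count x =
        (if x = a then w.length + 1 else 0) + t.count x := by
      intro x
      rw [List.count_cons, ← hwdef, List.count_append]
      by_cases hxa : x = a
      · subst hxa
        have hcw : w.count x = w.length :=
          List.count_eq_length.mpr (fun b hb => (hwall b hb).symm)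
        simp [hcw]; omega
      · have h0 : w.count x = 0 :=
          List.count_eq_zero.mpr (fun hx => hxa (hwall x hx))
        simp [h0, hxa, Ne.symm hxa]
    have hta : t.count a = 0 := List.count_eq_zero.mpr hanot
    have hlen : rest.length = w.length + t.length := by
      have := congrArg List.length hwdef
      simpa using this.symm
    have htt : t.length < rest.length := ht
    have hw1 : 0 < w.length := by omega
    have hrun : runDups (a :: rest) = a :: runDups t := by
      rw [runDups, if_pos ht]
    rcases ih hpt with ⟨ihp, ihm⟩
    constructor
    · rw [hrun]
      refine List.pairwise_cons.mpr ⟨?_, ihp⟩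
      intro x hx
      have : x ∈ t := List.count_pos_iff.mp (by have := (ihm x).mp hx; omega)
      exact hgt x this
    · intro x
      rw [hrun, List.mem_cons, ihm x, hcount x]
      by_cases hxa : x = a
      · subst hxa
        rw [if_pos rfl, hta]
        constructor
        · intro _; omega
        · intro _; exact Or.inl rfl
      · rw [if_neg hxa]
        simp [hxa]
  | case3 a rest t ht ih =>
    have hsub : t.Sublist rest := by
      simpa [t] using List.dropWhile_sublist (l := rest) (p := (· == a))
    have hpt : t.Pairwise (· ≤ ·) := ((List.pairwise_cons.mp h).2).sublist hsub
    have hale : ∀ x ∈ rest, a ≤ x := (List.pairwise_cons.mp h).1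
    have hgt : ∀ x ∈ t, a < x := by
      cases hh : t with
      | nil => simp
      | cons b t' =>
        have hba : ¬ (b == a) = true := by
          have := List.head?_dropWhile_not (p := (· == a)) (l := rest)
          rw [show rest.dropWhile (· == a) = t from rfl, hh] at this
          simpa using this
        have hab : a ≤ b := hale b (hsub.mem (by simp [hh]))
        have hne : a ≠ b := fun he => hba (by simp [he])
        have halt : a < b := lt_of_le_of_ne hab hne
        intro x hx
        rcases (by simpa [hh] using hx : x = b ∨ x ∈ t') with rfl | hx'
        · exact halt
        · have hblex : b ≤ x := ((List.pairwise_cons.mp (hh ▸ hpt)).1) x hx'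
          exact lt_of_lt_of_le halt hblex
    have hanot : a ∉ t := fun hx => lt_irrefl a (hgt a hx)
    obtain ⟨w, hwdef, hwall⟩ : ∃ w, w ++ t = rest ∧ ∀ x ∈ w, x = a :=
      ⟨rest.takeWhile (· == a), List.takeWhile_append_dropWhile,
       fun x hx => by simpa using List.mem_takeWhile_imp hx⟩
    have hcount : ∀ x, (a :: rest).count x =
        (if x = a then w.length + 1 else 0) + t.count x := by
      intro x
      rw [List.count_cons, ← hwdef, List.count_append]
      by_cases hxa : x = a
      · subst hxa
        have hcw : w.count x = w.length :=
          List.count_eq_length.mpr (fun b hb => (hwall b hb).symm)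
        simp [hcw]; omega
      · have h0 : w.count x = 0 :=
          List.count_eq_zero.mpr (fun hx => hxa (hwall x hx))
        simp [h0, hxa, Ne.symm hxa]
    have hta : t.count a = 0 := List.count_eq_zero.mpr hanot
    have hlen : rest.length = w.length + t.length := by
      have := congrArg List.length hwdef
      simpa using this.symm
    have htt : ¬ t.length < rest.length := ht
    have hw0 : w.length = 0 := by omega
    have hrun : runDups (a :: rest) = runDups t := by
      rw [runDups, if_neg ht]
    rcases ih hpt with ⟨ihp, ihm⟩
    refine ⟨hrun ▸ ihp, ?_⟩
    intro x
    rw [hrun, ihm x, hcount x]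
    by_cases hxa : x = a
    · subst hxa
      rw [if_pos rfl, hta]
      constructor
      · intro hx
        exact absurd ((ihm x).mpr (by omega)) (by rw [ihm x, hta]; omega)
      · intro hx; omega
    · rw [if_neg hxa]
      simp

-- B's sort-then-run-scan equals A's sorted set of values with count > 1
theorem runDups_eq_sorted_dups (xs : List String) :
    PySem.List.sorted (PySem.Set.ofList (xs.filter (fun c => 1 < xs.count c))) (fun x => x) false
      = runDups (PySem.List.sorted xs (fun x => x) false) := by
  set ys := PySem.List.sorted xs (fun x => x) false with hys
  have hp : ys.Pairwise (· ≤ ·) := by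
    simpa using PySem.List.sorted_pairwise (xs := xs) (key := fun x => x)
  rcases runDups_spec ys hp with ⟨hlt, hmem⟩
  have hperm : ys.Perm xs := by rw [hys]; exact PySem.List.sorted_perm _ _ _
  apply PySem.List.sorted_eq_of_perm_of_pairwise_lt
  · -- permutation: both sides nodup with the same membership
    have hnd : (runDups ys).Nodup := hlt.imp ne_of_lt
    rw [List.perm_ext_iff_of_nodup hnd (PySem.Set.nodup_ofList _)]
    intro x
    rw [hmem x, PySem.Set.mem_ofList _ x, List.mem_filter, hperm.count_eq]
    constructor
    · intro hx
      exact ⟨List.count_pos_iff.mp (by omega), by simpa using hx⟩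
    · intro ⟨_, hx⟩; simpa using hx
  · simpa using hlt

-- filtering the zip of a list with its stripped copy, then projecting, is A's direct filter
theorem zip_strip_whitespace (l : List String) :
    ((l.zip (l.map PySem.Str.strip)).filter (fun p => decide (p.1 ≠ p.2))).map Prod.fst
      = l.filter (fun c => decide (c ≠ PySem.Str.strip c)) := by
  induction l with
  | nil => rfl
  | cons c tl ih =>
    simp only [List.map_cons, List.zip_cons_cons, List.filter_cons]
    by_cases hq : c = PySem.Str.strip c
    · rw [if_neg (by simp [← hq]), if_neg (by simp [← hq])]
      exact ih
    · rw [if_pos (by simp [hq]), if_pos (by simp [hq])]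
      simp only [List.map_cons]
      exact congrArg (List.cons c) ih

theorem zip_strip_empty (l : List String) :
    ((l.zip (l.map PySem.Str.strip)).filter (fun p => p.2 == "")).map Prod.fst
      = l.filter (fun c => PySem.Str.strip c == "") := by
  induction l with
  | nil => rfl
  | cons c tl ih =>
    simp only [List.map_cons, List.zip_cons_cons, List.filter_cons]
    by_cases hq : PySem.Str.strip c = ""
    · rw [if_pos (by simp [hq]), if_pos (by simp [hq])]
      simp only [List.map_cons]
      exact congrArg (List.cons c) ih
    · rw [if_neg (by simp [hq]), if_neg (by simp [hq])]
      exact ih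

-- ===== VERDICT (by name: the statement is the Claim_ definition above) =====
theorem header_issues_py_spec : Claim_equal_header_issues_py := by
  intro columns _
  unfold Spec_header_issues_py header_issues_py header_issues_py_alt
  simp only [runDups_eq_sorted_dups, zip_strip_whitespace, zip_strip_empty]
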